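-- pv_equiv track=rewrite | github.com/LongJeffreySilver/NTLFlowLyzer2CICFlowMeter | NTLFlowLyzer2CICFlowMeter.py | build_rename_dict
-- ===== SOURCE A (Python) =====
-- def build_rename_dict(mapping: dict) -> dict:
--     rename_dict = {}
--     seen_orig = set()
--
--     for new_name, orig_name in mapping.items():
--         if orig_name not in seen_orig:
--             rename_dict[orig_name] = new_name
--             seen_orig.add(orig_name)
--     return rename_dict
-- ===== SOURCE B (Python) =====
-- def build_rename_dict(mapping: dict) -> dict:
--     # Pass 1: walking the items in reverse and overwriting unconditionally leaves,
--     # for every original name, the new name of its EARLIEST occurrence.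
--     first_new = {}
--     for new_name, orig_name in reversed(list(mapping.items())):
--         first_new[orig_name] = new_name
--     # Pass 2: dict.fromkeys gives the original names deduplicated in first-occurrence
--     # order, which is exactly the key order of the result.
--     return {orig: first_new[orig] for orig in dict.fromkeys(orig for _, orig in mapping.items())}
-- ===== Notes on version B (the rewrite author's own statement) =====
-- stated objective: alternative
-- what changed: Replaces the single guarded pass with a seen-set by two unguarded passes: a reverse-order overwrite pass that leaves each original name's earliest new name, then a dict.fromkeys dedup of the original names to restore first-occurrence key order.
import Mathlib
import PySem

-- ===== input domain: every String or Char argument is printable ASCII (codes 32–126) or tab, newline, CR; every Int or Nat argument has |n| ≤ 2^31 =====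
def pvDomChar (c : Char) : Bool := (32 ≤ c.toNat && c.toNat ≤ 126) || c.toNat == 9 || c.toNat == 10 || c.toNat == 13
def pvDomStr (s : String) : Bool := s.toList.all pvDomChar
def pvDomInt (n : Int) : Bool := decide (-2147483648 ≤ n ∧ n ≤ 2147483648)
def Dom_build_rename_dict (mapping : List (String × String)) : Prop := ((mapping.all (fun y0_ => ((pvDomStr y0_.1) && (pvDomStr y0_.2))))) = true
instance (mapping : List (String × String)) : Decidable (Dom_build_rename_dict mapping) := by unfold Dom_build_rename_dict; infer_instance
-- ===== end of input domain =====

-- B replaces A's guarded single pass (seen-set + if) by two unguarded passes: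
-- a reverse overwrite pass for the values and a dict.fromkeys dedup for the key order.

-- ===== PORT A =====
-- loop state: (rename_dict, seen_orig)
def build_rename_dict (mapping : List (String × String)) : List (String × String) :=
  (mapping.foldl
    (fun (st : PySem.Dict String String × PySem.Set String) x =>
      if x.2 ∈ st.2 then st
      else (st.1.insert x.2 x.1, st.2.add x.2))
    (PySem.Dict.empty, PySem.Set.empty)).1.items

-- ===== PORT B =====
def build_rename_dict_alt (mapping : List (String × String)) : List (String × String) :=
  let first_new : PySem.Dict String String :=
    mapping.reverse.foldl (fun d (x : String × String) => d.insert x.2 x.1) PySem.Dict.empty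
  -- first_new[orig] in the comprehension: every orig iterated is a key of first_new,
  -- so getD with a dummy default is exact (the KeyError branch is unreachable)
  ((PySem.List.dedup (mapping.map (fun x => x.2))).foldl
    (fun d o => d.insert o (first_new.getD o "")) PySem.Dict.empty).items

-- ===== PRECONDITION & SPEC =====
def Spec_build_rename_dict (mapping : List (String × String)) (out : List (String × String)) : Prop := out = build_rename_dict_alt mapping
instance (mapping : List (String × String)) (out : List (String × String)) : Decidable (Spec_build_rename_dict mapping out) := by unfold Spec_build_rename_dict; infer_instance

-- ===== CLAIM (what is proved, stated in full; the proofs are below) =====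
def Claim_equal_build_rename_dict : Prop := ∀ (mapping : List (String × String)), Dom_build_rename_dict mapping → Spec_build_rename_dict mapping (build_rename_dict mapping)

-- ===== LEMMAS AND PROOFS =====

-- the new name at the first occurrence of o (dummy "" if o never occurs)
def firstVal (l : List (String × String)) (o : String) : String :=
  ((l.find? (fun p => p.2 == o)).map (fun p => p.1)).getD ""

-- the pairs A appends, given the already-seen originals
def specList (seen : List String) : List (String × String) → List (String × String)
  | [] => []
  | x :: t => if x.2 ∈ seen then specList seen t else (x.2, x.1) :: specList (seen ++ [x.2]) t

-- the fresh originals A meets, in order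
def newKeys (seen : List String) : List (String × String) → List String
  | [] => []
  | x :: t => if x.2 ∈ seen then newKeys seen t else x.2 :: newKeys (seen ++ [x.2]) t

lemma newKeys_not_mem (l : List (String × String)) :
    ∀ (seen : List String) (o : String), o ∈ newKeys seen l → o ∉ seen := by
  induction l with
  | nil => intro seen o h; simp [newKeys] at h
  | cons x t ih =>
    intro seen o h hs
    by_cases hx : x.2 ∈ seen
    · simp [newKeys, hx] at h; exact ih seen o h hs
    · simp [newKeys, hx] at h
      rcases h with h | h
      · exact hx (h ▸ hs)
      · exact ih _ o h (by simp [hs])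

-- reversed-fold insert looks up the FIRST occurrence
lemma firstNew_get? (l : List (String × String)) :
    ∀ (d : PySem.Dict String String) (o : String),
      (l.reverse.foldl (fun d (x : String × String) => d.insert x.2 x.1) d).get? o
        = ((l.find? (fun p => p.2 == o)).map (fun p => p.1)).orElse (fun _ => d.get? o) := by
  induction l with
  | nil => intro d o; simp
  | cons x t ih =>
    intro d o
    simp only [List.reverse_cons, List.foldl_append, List.foldl_cons, List.foldl_nil,
      PySem.Dict.get?_insert]
    rw [ih]
    by_cases h : o = x.2
    · simp only [h, List.find?_cons]
      cases t.find? (fun p => p.2 == x.2) <;> simp [Option.orElse]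
    · have hb : (x.2 == o) = false := beq_eq_false_iff_ne.mpr (fun e => h (Eq.symm e))
      simp only [if_neg h, List.find?_cons, hb]

-- A's fold, characterised by specList
lemma foldA_items (l : List (String × String)) :
    ∀ (d : PySem.Dict String String) (s : PySem.Set String),
      d.keys = s → d.keys.Nodup →
      (l.foldl
        (fun (st : PySem.Dict String String × PySem.Set String) x =>
          if x.2 ∈ st.2 then st
          else (st.1.insert x.2 x.1, st.2.add x.2))
        (d, s)).1.items = d.items ++ specList s l := by
  induction l with
  | nil => intro d s hk hn; simp [specList]
  | cons x t ih =>
    intro d s hk hn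
    by_cases hx : x.2 ∈ s
    · have hstep : (if x.2 ∈ ((d, s) : PySem.Dict String String × PySem.Set String).2
          then ((d, s) : PySem.Dict String String × PySem.Set String)
          else ((d, s).1.insert x.2 x.1, (d, s).2.add x.2)) = (d, s) := if_pos hx
      rw [List.foldl_cons, hstep, specList, if_pos hx]
      exact ih d s hk hn
    · have hc : d.contains x.2 = false := by
        rw [PySem.Dict.contains_eq_decide_mem_keys, hk]
        simpa using hx
      have hsc : PySem.Set.contains s x.2 = false := by
        simp only [PySem.Set.contains, List.contains_eq_mem]; simpa using hx
      have hadd : s.add x.2 = s ++ [x.2] := by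
        simp only [PySem.Set.add, hsc, Bool.false_eq_true, if_false]
      have hstep : (if x.2 ∈ ((d, s) : PySem.Dict String String × PySem.Set String).2
          then ((d, s) : PySem.Dict String String × PySem.Set String)
          else ((d, s).1.insert x.2 x.1, (d, s).2.add x.2))
            = (d.insert x.2 x.1, s.add x.2) := if_neg hx
      rw [List.foldl_cons, hstep, specList, if_neg hx]
      rw [ih (d.insert x.2 x.1) (s.add x.2)
        (by rw [PySem.Dict.keys_insert_of_not_contains d x.1 hc, hk, hadd])
        (by rw [PySem.Dict.keys_insert_of_not_contains d x.1 hc, hk]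
            exact List.Nodup.append (hk ▸ hn) (List.nodup_singleton _)
              (by simpa using fun h => hx h))]
      rw [PySem.Dict.items_insert_of_not_contains d x.1 hc, hadd]
      simp

-- specList as a map over newKeys
lemma specList_eq_map (l : List (String × String)) :
    ∀ (seen : List String),
      specList seen l = (newKeys seen l).map (fun o => (o, firstVal l o)) := by
  induction l with
  | nil => intro seen; simp [specList, newKeys]
  | cons x t ih =>
    intro seen
    by_cases hx : x.2 ∈ seen
    · rw [specList, if_pos hx, newKeys, if_pos hx, ih seen]
      apply List.map_congr_left
      intro o ho
      have hne : o ≠ x.2 := fun h => (newKeys_not_mem t seen o ho) (h ▸ hx)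
      have hb : (x.2 == o) = false := beq_eq_false_iff_ne.mpr (Ne.symm hne)
      simp only [firstVal, List.find?_cons, hb]
    · rw [specList, if_neg hx, newKeys, if_neg hx, List.map_cons, ih (seen ++ [x.2])]
      have hv : firstVal (x :: t) x.2 = x.1 := by
        simp only [firstVal, List.find?_cons, BEq.rfl, Option.map_some, Option.getD_some]
      rw [hv]
      have hrest : ∀ o ∈ newKeys (seen ++ [x.2]) t, firstVal t o = firstVal (x :: t) o := by
        intro o ho
        have hne : o ≠ x.2 := fun h => by
          have := newKeys_not_mem t (seen ++ [x.2]) o ho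
          exact this (by simp [h])
        have hb : (x.2 == o) = false := beq_eq_false_iff_ne.mpr (Ne.symm hne)
        simp only [firstVal, List.find?_cons, hb]
      rw [List.map_congr_left (fun o ho => by rw [hrest o ho])]

-- Set.ofList of the originals is exactly newKeys from empty
lemma ofList_eq_newKeys (l : List (String × String)) :
    ∀ (s : List String),
      (l.map (fun x => x.2)).foldl PySem.Set.add s = s ++ newKeys s l := by
  induction l with
  | nil => intro s; simp [newKeys]
  | cons x t ih =>
    intro s
    by_cases hx : x.2 ∈ s
    · have hsc : PySem.Set.contains s x.2 = true := by
        simp only [PySem.Set.contains, List.contains_eq_mem]; simpa using hx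
      simp only [List.map_cons, List.foldl_cons, PySem.Set.add, hsc, if_true, newKeys, hx]
      exact ih s
    · have hsc : PySem.Set.contains s x.2 = false := by
        simp only [PySem.Set.contains, List.contains_eq_mem]; simpa using hx
      simp only [List.map_cons, List.foldl_cons, PySem.Set.add, hsc, Bool.false_eq_true,
        if_false, newKeys, hx]
      rw [ih (s ++ [x.2])]
      simp

lemma dedup_eq_newKeys (l : List (String × String)) :
    PySem.List.dedup (l.map (fun x => x.2)) = newKeys [] l := by
  have := ofList_eq_newKeys l []
  simpa [PySem.List.dedup, PySem.Set.ofList, PySem.Set.empty] using this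

lemma firstNew_getD (l : List (String × String)) (o : String) :
    (l.reverse.foldl (fun d (x : String × String) => d.insert x.2 x.1)
        PySem.Dict.empty).getD o "" = firstVal l o := by
  rw [PySem.Dict.getD, firstNew_get?]
  cases h : l.find? (fun p => p.2 == o) <;> simp [firstVal, h, Option.orElse]

-- ===== VERDICT (by name: the statement is the Claim_ definition above) =====
theorem build_rename_dict_spec : Claim_equal_build_rename_dict := by
  intro mapping _
  unfold Spec_build_rename_dict build_rename_dict build_rename_dict_alt
  have hA := foldA_items mapping PySem.Dict.empty PySem.Set.empty rfl (by simp)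
  rw [hA]
  have hfresh : ∀ o ∈ PySem.List.dedup (mapping.map (fun x => x.2)),
      (PySem.Dict.empty : PySem.Dict String String).contains o = false := by
    intro o _; simp
  rw [PySem.Dict.items_foldl_insert_fresh _ _ _ _ hfresh
    (by rw [show (fun (o : String) => o) = id from rfl, List.map_id]
        exact PySem.Set.nodup_ofList _)]
  rw [dedup_eq_newKeys, specList_eq_map]
  show _ = (newKeys [] mapping).map _
  rw [show (PySem.Dict.empty : PySem.Dict String String).items = [] from rfl, List.nil_append]
  exact List.map_congr_left (fun o _ => by rw [← firstNew_getD])
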